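-- pv_equiv track=rewrite | github.com/vinayswamik/wisq | src/wisq/sarouting.py | build_crit_dict
-- ===== SOURCE A (Python) =====
-- def build_crit_dict(gates):
--     crit_dict ={}
--     for id,qubits in gates.items():
--         dependent = get_dependent_gates((id,qubits), gates)
--         depths = get_depth_by_qubit(dependent)
--         crit_path = max(depths.get(q,0) for q in qubits)
--         crit_dict[id] = crit_path
--     return crit_dict
--
-- def get_depth_by_qubit(gates):
--     depth_by_qubit = {}
--     for i in gates:
--         qubits = gates[i]
--         depths = (depth_by_qubit.get(q,  0) for q in qubits)
--         max_depth = max(depths)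
--         for qubit in qubits:
--             depth_by_qubit[qubit] = 1 + max_depth
--     return depth_by_qubit
--
-- def get_dependent_gates(gate_tuple, remaining):
--     id, initial_gate = gate_tuple
--     dependent = {}
--     dependent[id] = initial_gate
--     for id,gate in remaining.items():
--
--         if any(depends_on((id,gate), added) for added in dependent.items()):
--             dependent[id] = gate
--
--     return dependent
--
-- def depends_on(g1, g2):
--     return g1[0] > g2[0] and len(set(g1[1]).intersection(g2[1])) > 0
-- ===== SOURCE B (Python) =====
-- def build_crit_dict(gates):
--     # One fused pass per gate: a per-qubit min-id index replaces the inner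
--     # scan over the dependent set, and depths are computed as gates are added.
--     crit_dict = {}
--     for gid, qubits in gates.items():
--         minid = {q: gid for q in qubits}
--         depth_q = {q: 1 for q in qubits}
--         for j, qj in gates.items():
--             if j != gid and any(q in minid and minid[q] < j for q in qj):
--                 dj = 1 + max(depth_q.get(q, 0) for q in qj)
--                 for q in qj:
--                     depth_q[q] = dj
--                     if q not in minid or j < minid[q]:
--                         minid[q] = j
--         crit_dict[gid] = max(depth_q[q] for q in qubits)
--     return crit_dict
-- ===== Notes on version B (the rewrite author's own statement) =====
-- stated objective: faster
-- what changed: Per gate, A builds the dependent set with an inner any-scan over all gates added so far (building a Python set intersection per pair) and then runs a second depth pass over that set; B keeps a per-qubit minimum-id index so membership is decided by looking at the gate's own qubits only, and computes the qubit depths in the same single fused pass, so the dependent dict, the inner scan and the second pass all disappear.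
import Mathlib
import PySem

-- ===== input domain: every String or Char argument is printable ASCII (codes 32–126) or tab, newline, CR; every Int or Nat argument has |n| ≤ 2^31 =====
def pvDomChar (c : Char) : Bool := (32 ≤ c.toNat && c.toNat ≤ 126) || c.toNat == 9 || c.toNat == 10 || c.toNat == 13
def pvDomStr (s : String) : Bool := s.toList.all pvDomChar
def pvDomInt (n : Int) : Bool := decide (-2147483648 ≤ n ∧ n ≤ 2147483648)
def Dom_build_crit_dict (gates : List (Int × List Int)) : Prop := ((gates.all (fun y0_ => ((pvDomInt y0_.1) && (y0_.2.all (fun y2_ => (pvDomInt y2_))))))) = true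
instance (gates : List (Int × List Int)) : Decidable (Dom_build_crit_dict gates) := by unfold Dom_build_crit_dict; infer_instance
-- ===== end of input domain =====

-- B replaces A's per-gate dependent-set scan (inner `any` over all gates added
-- so far, with a set intersection per pair) by a per-qubit min-id index and
-- computes the qubit depths in the same single pass; measurably faster.

-- ===== PORT A =====
-- depends_on(g1, g2)
def pyDependsOn (g1 g2 : Int × List Int) : Bool :=
  decide (g1.1 > g2.1) && decide (0 < (PySem.Set.inter (PySem.Set.ofList g1.2) g2.2).length)

-- get_dependent_gates(gate_tuple, remaining)
def pyGetDependentGates (gt : Int × List Int) (remaining : PySem.Dict Int (List Int)) :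
    PySem.Dict Int (List Int) :=
  remaining.items.foldl
    (fun dep p =>
      if dep.items.any (fun added => pyDependsOn p added) then dep.insert p.1 p.2 else dep)
    (PySem.Dict.empty.insert gt.1 gt.2)

-- get_depth_by_qubit(gates); `max(depths)` raises ValueError on an empty qubit
-- list in Python — the `.getD 0` there is junk outside Pre_ only.
def pyDepthStep (g : PySem.Dict Int (List Int)) (dbq : PySem.Dict Int Int) (i : Int) :
    PySem.Dict Int Int :=
  let qubits := g.getD i []   -- gates[i]: the key is always present, so getD is exact
  let max_depth := (PySem.List.max? (qubits.map (fun q => dbq.getD q 0)) (fun x => x)).getD 0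
  qubits.foldl (fun d q => d.insert q (1 + max_depth)) dbq

def pyGetDepthByQubit (g : PySem.Dict Int (List Int)) : PySem.Dict Int Int :=
  g.keys.foldl (pyDepthStep g) PySem.Dict.empty

-- build_crit_dict(gates); the argument dict is the assoc list read with Python
-- dict semantics (last duplicate key wins, first position kept).
def build_crit_dict (gates : List (Int × List Int)) : List (Int × Int) :=
  let d := PySem.Dict.ofList gates
  (d.items.foldl
    (fun crit p =>
      let dependent := pyGetDependentGates p d
      let depths := pyGetDepthByQubit dependent
      let crit_path := (PySem.List.max? (p.2.map (fun q => depths.getD q 0)) (fun x => x)).getD 0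
      crit.insert p.1 crit_path)
    PySem.Dict.empty).items

-- ===== PORT B =====
-- `if q not in minid or j < minid[q]: minid[q] = j`
def altMinUpd (j : Int) (m : PySem.Dict Int Int) (q : Int) : PySem.Dict Int Int :=
  match m.get? q with
  | none => m.insert q j
  | some v => if j < v then m.insert q j else m

-- the body of B's fused inner loop for the gate with id I
def altStep (I : Int) (st : PySem.Dict Int Int × PySem.Dict Int Int) (p : Int × List Int) :
    PySem.Dict Int Int × PySem.Dict Int Int :=
  if p.1 ≠ I ∧ p.2.any (fun q => match st.1.get? q with | some v => decide (v < p.1) | none => false) then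
    let dj := 1 + (PySem.List.max? (p.2.map (fun q => st.2.getD q 0)) (fun x => x)).getD 0
    (p.2.foldl (fun m q => altMinUpd p.1 m q) st.1,
     p.2.foldl (fun m q => m.insert q dj) st.2)
  else st

-- build_crit_dict(gates), implementation B; the final `max(depth_q[q] …)`
-- raises ValueError on an empty qubit list — `.getD 0` is junk outside Pre_ only.
def build_crit_dict_alt (gates : List (Int × List Int)) : List (Int × Int) :=
  let d := PySem.Dict.ofList gates
  (d.items.foldl
    (fun crit p =>
      let st := d.items.foldl (altStep p.1)
        (p.2.foldl (fun m q => m.insert q p.1) PySem.Dict.empty,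
         p.2.foldl (fun m q => m.insert q 1) PySem.Dict.empty)
      crit.insert p.1 ((PySem.List.max? (p.2.map (fun q => st.2.getD q 0)) (fun x => x)).getD 0))
    PySem.Dict.empty).items

-- ===== PRECONDITION & SPEC =====
-- Pre_ excludes exactly the inputs on which the Python A raises ValueError
-- (`max()` of an empty sequence): some gate of the dict has an empty qubit list.
def Pre_build_crit_dict (gates : List (Int × List Int)) : Prop :=
  ∀ v ∈ (PySem.Dict.ofList gates).values, v ≠ []
instance (gates : List (Int × List Int)) : Decidable (Pre_build_crit_dict gates) := by
  unfold Pre_build_crit_dict; infer_instance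

def pvWitness_build_crit_dict : (List (Int × List Int)) := [(0, [0]), (1, [0, 1]), (2, [1])]

def Spec_build_crit_dict (gates : List (Int × List Int)) (out : List (Int × Int)) : Prop := out = build_crit_dict_alt gates
instance (gates : List (Int × List Int)) (out : List (Int × Int)) : Decidable (Spec_build_crit_dict gates out) := by unfold Spec_build_crit_dict; infer_instance

-- ===== CLAIM (what is proved, stated in full; the proofs are below) =====
def Claim_equal_build_crit_dict : Prop := ∀ (gates : List (Int × List Int)), Dom_build_crit_dict gates → Pre_build_crit_dict gates → Spec_build_crit_dict gates (build_crit_dict gates)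

-- ===== LEMMAS AND PROOFS =====

-- value of a key after a uniform-value insert loop
lemma get?_foldl_insert_const (Q : List Int) (c : Int) (m : PySem.Dict Int Int) (q : Int) :
    (Q.foldl (fun m q' => m.insert q' c) m).get? q = if q ∈ Q then some c else m.get? q := by
  induction Q generalizing m with
  | nil => simp
  | cons q0 Q ih =>
      simp only [List.foldl_cons, ih, List.mem_cons]
      by_cases hq : q ∈ Q
      · simp [hq]
      · by_cases hq0 : q = q0 <;> simp [hq, hq0, PySem.Dict.get?_insert]

-- value of a key after B's min-update loop
lemma get?_altMinUpd (j : Int) (m : PySem.Dict Int Int) (q0 q : Int) :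
    (altMinUpd j m q0).get? q =
      if q = q0 then some (match m.get? q0 with | none => j | some v => min j v)
      else m.get? q := by
  unfold altMinUpd
  rcases hm : m.get? q0 with _ | v
  · by_cases hq : q = q0 <;> simp [PySem.Dict.get?_insert, hq]
  · by_cases hlt : j < v
    · by_cases hq : q = q0 <;>
        simp [hlt, PySem.Dict.get?_insert, hq, min_eq_left (le_of_lt hlt)]
    · by_cases hq : q = q0 <;>
        simp [hlt, hq, hm, min_eq_right (le_of_not_gt hlt)]

-- value of a key after B's min-update loop
lemma get?_foldl_minUpd (j : Int) (Q : List Int) (m : PySem.Dict Int Int) (q : Int) :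
    (Q.foldl (fun m q' => altMinUpd j m q') m).get? q =
      if q ∈ Q then some (match m.get? q with | none => j | some v => min j v)
      else m.get? q := by
  induction Q generalizing m with
  | nil => simp
  | cons q0 Q ih =>
      simp only [List.foldl_cons, ih (altMinUpd j m q0), List.mem_cons, get?_altMinUpd]
      by_cases hq0 : q = q0
      · subst hq0
        by_cases hq : q ∈ Q
        · simp only [hq, if_true, or_true]
          rcases m.get? q with _ | v <;> simp
        · simp [hq]
      · by_cases hq : q ∈ Q <;> simp [hq, hq0]

-- a key maps to a unique value in a list with nodup keys
lemma key_unique {ν : Type} (l : List (Int × ν)) (h : (l.map Prod.fst).Nodup)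
    {a : Int} {b c : ν} (h1 : (a, b) ∈ l) (h2 : (a, c) ∈ l) : b = c := by
  induction l with
  | nil => cases h1
  | cons x l ih =>
      simp only [List.map_cons, List.nodup_cons, List.mem_map] at h
      rcases List.mem_cons.1 h1 with h1 | h1 <;> rcases List.mem_cons.1 h2 with h2 | h2
      · rw [← h1] at h2; exact (Prod.mk.injEq a c a b ▸ h2).2.symm
      · exact absurd ⟨(a, c), h2, by rw [← h1]⟩ h.1
      · exact absurd ⟨(a, b), h1, by rw [← h2]⟩ h.1
      · exact ih h.2 h1 h2

-- a dict is unchanged by re-inserting a present binding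
lemma insert_self_of_get? {ν : Type} (d : PySem.Dict Int ν) (k : Int) (v : ν)
    (hnd : d.keys.Nodup) (h : d.get? k = some v) : d.insert k v = d := by
  have hkv : (k, v) ∈ d.items := PySem.Dict.mem_items_of_get?_eq_some d h
  have hc : d.contains k = true := by
    rw [PySem.Dict.contains_eq_isSome_get?, h]; rfl
  apply PySem.Dict.ext
  rw [PySem.Dict.items_insert_of_contains (h := hc)]
  have huniq : ∀ p ∈ d.items, p.1 = k → p = (k, v) := by
    intro p hp hpk
    have hv : p.2 = v := by
      have hm : (k, p.2) ∈ d.items := by rw [← hpk]; exact hp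
      exact key_unique d.items hnd hm hkv
    cases p; simp_all
  calc d.items.map (fun p => if p.1 == k then (k, v) else p)
      = d.items.map id := by
        apply List.map_congr_left
        intro p hp
        by_cases hk : p.1 = k
        · simp [huniq p hp hk]
        · simp [hk]
    _ = d.items := List.map_id d.items


-- max over a constant-0 projection is 0
lemma max?_const_zero (l : List Int) :
    (PySem.List.max? (l.map (fun _ => (0 : Int))) (fun x => x)).getD 0 = 0 := by
  cases l with
  | nil => simp [PySem.List.max?]
  | cons a t =>
      rw [List.map_cons, PySem.List.max?_id_cons]
      have h0 : ∀ t : List Int, (List.replicate t.length (0:Int)).foldl max 0 = 0 := by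
        intro t; induction t with
        | nil => rfl
        | cons b t ih => simpa using ih
      simp [h0 t]

-- the per-qubit min-id invariant tying A's dependent dict to B's minid index
def InvMin (dep : PySem.Dict Int (List Int)) (minid : PySem.Dict Int Int) : Prop :=
  ∀ q j, (∃ p ∈ dep.items, p.1 < j ∧ q ∈ p.2) ↔ (∃ v, minid.get? q = some v ∧ v < j)

-- A's dependency test over the dependent set equals B's test on the min-id index
lemma any_dep_eq (p : Int × List Int) (dep : PySem.Dict Int (List Int))
    (minid : PySem.Dict Int Int) (hinv : InvMin dep minid) :
    dep.items.any (fun added => pyDependsOn p added)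
      = p.2.any (fun q => match minid.get? q with | some v => decide (v < p.1) | none => false) := by
  rw [Bool.eq_iff_iff, List.any_eq_true, List.any_eq_true]
  constructor
  · rintro ⟨ad, had, hdep⟩
    unfold pyDependsOn at hdep
    simp only [Bool.and_eq_true, decide_eq_true_eq] at hdep
    obtain ⟨hlt, hlen⟩ := hdep
    obtain ⟨q, hq⟩ := List.exists_mem_of_length_pos hlen
    rw [PySem.Set.mem_inter, PySem.Set.mem_ofList] at hq
    obtain ⟨v, hv, hvlt⟩ := (hinv q p.1).mp ⟨ad, had, hlt, hq.2⟩
    exact ⟨q, hq.1, by simp [hv, hvlt]⟩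
  · rintro ⟨q, hq, hm⟩
    rcases hv : minid.get? q with _ | v
    · rw [hv] at hm; cases hm
    · rw [hv] at hm; simp only [decide_eq_true_eq] at hm
      obtain ⟨ad, had, hlt, hqad⟩ := (hinv q p.1).mpr ⟨v, hv, hm⟩
      refine ⟨ad, had, ?_⟩
      unfold pyDependsOn
      simp only [Bool.and_eq_true, decide_eq_true_eq]
      refine ⟨hlt, List.length_pos_of_mem (a := q) ?_⟩
      rw [PySem.Set.mem_inter, PySem.Set.mem_ofList]
      exact ⟨hq, hqad⟩

-- inserting a fresh gate extends the depth pass by one step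
lemma pyDepthStep_insert_ne (dep : PySem.Dict Int (List Int)) (j : Int) (Qj : List Int)
    (acc : PySem.Dict Int Int) (i : Int) (hij : i ≠ j) :
    pyDepthStep (dep.insert j Qj) acc i = pyDepthStep dep acc i := by
  unfold pyDepthStep
  simp only [PySem.Dict.getD_insert, hij, if_false]

lemma pyGetDepthByQubit_insert (dep : PySem.Dict Int (List Int)) (j : Int) (Qj : List Int)
    (hc : dep.contains j = false) :
    pyGetDepthByQubit (dep.insert j Qj)
      = Qj.foldl (fun m q => m.insert q
          (1 + (PySem.List.max? (Qj.map (fun q => (pyGetDepthByQubit dep).getD q 0)) (fun x => x)).getD 0))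
          (pyGetDepthByQubit dep) := by
  have hjk : j ∉ dep.keys := fun h => by
    rw [← PySem.Dict.contains_iff_mem_keys] at h; rw [hc] at h; cases h
  unfold pyGetDepthByQubit
  rw [PySem.Dict.keys_insert_of_not_contains (h := hc), List.foldl_append, List.foldl_cons,
    List.foldl_nil]
  have hpre : dep.keys.foldl (pyDepthStep (dep.insert j Qj)) PySem.Dict.empty
      = dep.keys.foldl (pyDepthStep dep) PySem.Dict.empty :=
    PySem.List.foldl_congr_mem _ _ _ _ (fun acc i hi =>
      pyDepthStep_insert_ne dep j Qj acc i (fun h => hjk (h ▸ hi)))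
  rw [hpre]
  unfold pyDepthStep
  rw [PySem.Dict.getD_insert_self]

-- the depth pass over the initial one-gate dict is the all-ones init
lemma pyGetDepthByQubit_init (I : Int) (Q : List Int) :
    pyGetDepthByQubit (PySem.Dict.empty.insert I Q)
      = Q.foldl (fun m q => m.insert q 1) PySem.Dict.empty := by
  have h0 : pyGetDepthByQubit (PySem.Dict.empty : PySem.Dict Int (List Int)) = PySem.Dict.empty := rfl
  rw [pyGetDepthByQubit_insert PySem.Dict.empty I Q (by simp [PySem.Dict.contains_empty]), h0]
  have hmap : Q.map (fun q => (PySem.Dict.empty : PySem.Dict Int Int).getD q 0)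
      = Q.map (fun _ => (0 : Int)) := by
    simp [PySem.Dict.getD_empty]
  rw [hmap, max?_const_zero]
  norm_num

-- the workhorse: A's dependent pass followed by the depth pass equals B's fused pass
lemma scan_eq (L : List (Int × List Int)) (I : Int) (dep : PySem.Dict Int (List Int))
    (minid dq : PySem.Dict Int Int)
    (hnd : dep.keys.Nodup)
    (hLnd : (L.map Prod.fst).Nodup)
    (hfresh : ∀ p ∈ L, p.1 = I ∨ dep.contains p.1 = false)
    (hI : ∀ p ∈ L, p.1 = I → dep.get? I = some p.2)
    (hinv : InvMin dep minid)
    (hdq : dq = pyGetDepthByQubit dep) :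
    pyGetDepthByQubit
      (L.foldl
        (fun dep p =>
          if dep.items.any (fun added => pyDependsOn p added) then dep.insert p.1 p.2 else dep)
        dep)
      = (L.foldl (altStep I) (minid, dq)).2 := by
  induction L generalizing dep minid dq with
  | nil => simpa using hdq.symm
  | cons p L ih =>
      have hLnd' : (L.map Prod.fst).Nodup := (List.nodup_cons.1 hLnd).2
      have hphd : p.1 ∉ L.map Prod.fst := (List.nodup_cons.1 hLnd).1
      simp only [List.foldl_cons]
      by_cases hpI : p.1 = I
      · -- the initial gate re-visited: a no-op on both sides
        have hB : altStep I (minid, dq) p = (minid, dq) := by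
          unfold altStep; rw [if_neg]; rintro ⟨h, _⟩; exact h hpI
        have hget : dep.get? I = some p.2 := hI p List.mem_cons_self hpI
        have hins : dep.insert p.1 p.2 = dep := by
          rw [hpI]; exact insert_self_of_get? dep I p.2 hnd (by rw [← hpI] at hget ⊢; exact hget)
        have hA : (if dep.items.any (fun added => pyDependsOn p added)
            then dep.insert p.1 p.2 else dep) = dep := by
          split <;> simp [hins]
        rw [hB, hA]
        exact ih dep minid dq hnd hLnd'
          (fun p' hp' => hfresh p' (List.mem_cons_of_mem p hp'))
          (fun p' hp' => hI p' (List.mem_cons_of_mem p hp')) hinv hdq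
      · have hcon : dep.contains p.1 = false :=
          (hfresh p List.mem_cons_self).resolve_left hpI
        have htest := any_dep_eq p dep minid hinv
        by_cases ht : p.2.any (fun q =>
            match minid.get? q with | some v => decide (v < p.1) | none => false) = true
        · -- the gate joins the dependent set on both sides
          have hA : (if dep.items.any (fun added => pyDependsOn p added)
              then dep.insert p.1 p.2 else dep) = dep.insert p.1 p.2 := by
            rw [htest]; simp [ht]
          have hB : altStep I (minid, dq) p
              = (p.2.foldl (fun m q => altMinUpd p.1 m q) minid,
                 p.2.foldl (fun m q => m.insert q
                   (1 + (PySem.List.max? (p.2.map (fun q => dq.getD q 0)) (fun x => x)).getD 0)) dq) := by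
            unfold altStep; rw [if_pos ⟨hpI, ht⟩]
          rw [hA, hB]
          have hp1k : p.1 ∉ dep.keys := fun h => by
            rw [← PySem.Dict.contains_iff_mem_keys] at h; rw [hcon] at h; cases h
          apply ih
          · rw [PySem.Dict.keys_insert_of_not_contains (h := hcon)]
            refine List.Nodup.append hnd (List.nodup_singleton p.1) ?_
            intro a ha hb
            rw [List.mem_singleton] at hb
            exact hp1k (hb ▸ ha)
          · exact hLnd'
          · intro p' hp'
            rcases hfresh p' (List.mem_cons_of_mem p hp') with h | h
            · exact Or.inl h
            · refine Or.inr ?_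
              rw [PySem.Dict.contains_insert, h]
              have : p'.1 ≠ p.1 := fun he => hphd (he ▸ List.mem_map_of_mem hp')
              simp [this]
          · intro p' hp' hp'I
            rw [PySem.Dict.get?_insert]
            rw [if_neg (fun h => hpI h.symm)]
            exact hI p' (List.mem_cons_of_mem p hp') hp'I
          · -- the min-id invariant is preserved
            intro q j'
            rw [PySem.Dict.items_insert_of_not_contains (h := hcon), get?_foldl_minUpd]
            have hold := hinv q j'
            by_cases hqp : q ∈ p.2
            · rcases hv : minid.get? q with _ | v
              · rw [hv] at hold
                simp only [hqp, if_true]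
                constructor
                · rintro ⟨p', hp', hlt, hqp'⟩
                  rcases List.mem_append.1 hp' with h | h
                  · exact absurd (hold.1 ⟨p', h, hlt, hqp'⟩) (by rintro ⟨v, hv', _⟩; cases hv')
                  · rw [List.mem_singleton.1 h] at hlt
                    exact ⟨p.1, rfl, hlt⟩
                · rintro ⟨v, hv', hlt⟩
                  cases hv'
                  exact ⟨p, List.mem_append.2 (Or.inr (List.mem_singleton.2 rfl)), hlt, hqp⟩
              · rw [hv] at hold
                simp only [hqp, if_true]
                constructor
                · rintro ⟨p', hp', hlt, hqp'⟩
                  refine ⟨min p.1 v, rfl, ?_⟩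
                  rcases List.mem_append.1 hp' with h | h
                  · have := hold.1 ⟨p', h, hlt, hqp'⟩
                    obtain ⟨w, hw, hwlt⟩ := this
                    cases hw; omega
                  · rw [List.mem_singleton.1 h] at hlt; omega
                · rintro ⟨w, hw, hwlt⟩
                  cases hw
                  rcases le_or_gt p.1 v with hle | hlt2
                  · rw [min_eq_left hle] at hwlt
                    exact ⟨p, List.mem_append.2 (Or.inr (List.mem_singleton.2 rfl)), hwlt, hqp⟩
                  · rw [min_eq_right (le_of_lt hlt2)] at hwlt
                    obtain ⟨p', hp', hlt', hqp'⟩ := hold.2 ⟨v, rfl, hwlt⟩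
                    exact ⟨p', List.mem_append.2 (Or.inl hp'), hlt', hqp'⟩
            · simp only [hqp, if_false]
              rw [← hold]
              constructor
              · rintro ⟨p', hp', hlt, hqp'⟩
                rcases List.mem_append.1 hp' with h | h
                · exact ⟨p', h, hlt, hqp'⟩
                · rw [List.mem_singleton.1 h] at hqp'; exact absurd hqp' hqp
              · rintro ⟨p', hp', hlt, hqp'⟩
                exact ⟨p', List.mem_append.2 (Or.inl hp'), hlt, hqp'⟩
          · -- the depth dict after the fused update matches the depth pass
            rw [pyGetDepthByQubit_insert dep p.1 p.2 hcon, ← hdq]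
        · -- the gate is not dependent: a no-op on both sides
          have hA : (if dep.items.any (fun added => pyDependsOn p added)
              then dep.insert p.1 p.2 else dep) = dep := by
            rw [htest]; simp [ht]
          have hB : altStep I (minid, dq) p = (minid, dq) := by
            unfold altStep; rw [if_neg]; rintro ⟨_, h2⟩; exact ht h2
          rw [hA, hB]
          exact ih dep minid dq hnd hLnd'
            (fun p' hp' => hfresh p' (List.mem_cons_of_mem p hp'))
            (fun p' hp' => hI p' (List.mem_cons_of_mem p hp')) hinv hdq


-- the per-gate values of A and B agree
lemma per_gate_eq (gates : List (Int × List Int)) (p : Int × List Int)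
    (hp : p ∈ (PySem.Dict.ofList gates).items) :
    (PySem.List.max? (p.2.map (fun q =>
        (pyGetDepthByQubit (pyGetDependentGates p (PySem.Dict.ofList gates))).getD q 0))
      (fun x => x)).getD 0
    = (PySem.List.max? (p.2.map (fun q =>
        ((PySem.Dict.ofList gates).items.foldl (altStep p.1)
          (p.2.foldl (fun m q => m.insert q p.1) PySem.Dict.empty,
           p.2.foldl (fun m q => m.insert q 1) PySem.Dict.empty)).2.getD q 0))
      (fun x => x)).getD 0 := by
  have hnodup : ((PySem.Dict.ofList gates).items.map Prod.fst).Nodup :=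
    PySem.Dict.nodup_keys_ofList gates
  have hscan := scan_eq (PySem.Dict.ofList gates).items p.1
    (PySem.Dict.empty.insert p.1 p.2)
    (p.2.foldl (fun m q => m.insert q p.1) PySem.Dict.empty)
    (p.2.foldl (fun m q => m.insert q 1) PySem.Dict.empty)
    (by -- keys nodup
      rw [PySem.Dict.keys_insert_of_not_contains (h := PySem.Dict.contains_empty p.1)]
      simp [PySem.Dict.keys_empty])
    hnodup
    (by -- freshness
      intro p' hp'
      by_cases h : p'.1 = p.1
      · exact Or.inl h
      · refine Or.inr ?_
        rw [PySem.Dict.contains_insert]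
        simp [h, PySem.Dict.contains_empty])
    (by -- unique value at the initial key
      intro p' hp' he
      rw [PySem.Dict.get?_insert_self]
      have h1 : (p.1, p'.2) ∈ (PySem.Dict.ofList gates).items := by
        have : p' = (p.1, p'.2) := by cases p'; simp_all
        rw [← this]; exact hp'
      have h2 : (p.1, p.2) ∈ (PySem.Dict.ofList gates).items := by
        have : p = (p.1, p.2) := rfl
        rw [← this]; exact hp
      rw [key_unique _ hnodup h1 h2])
    (by -- initial min-id invariant
      intro q j'
      rw [PySem.Dict.items_insert_of_not_contains (h := PySem.Dict.contains_empty p.1),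
        get?_foldl_insert_const]
      have hie : (PySem.Dict.empty : PySem.Dict Int (List Int)).items = [] := rfl
      rw [hie, List.nil_append]
      by_cases hq : q ∈ p.2
      · simp [hq]
      · simp [hq])
    ((pyGetDepthByQubit_init p.1 p.2).symm)
  unfold pyGetDependentGates
  rw [hscan]

-- ===== VERDICT (by name: the statement is the Claim_ definition above) =====
theorem build_crit_dict_spec : Claim_equal_build_crit_dict := by
  intro gates _ _
  unfold Spec_build_crit_dict build_crit_dict build_crit_dict_alt
  simp only []
  congr 1
  apply PySem.List.foldl_congr_mem
  intro crit p hp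
  have h := per_gate_eq gates p hp
  unfold pyGetDependentGates at h
  exact congrArg (fun v => crit.insert p.1 v) h
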